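-- pv_equiv track=rewrite | github.com/MichalSha/KerberosSmartcardPaddingOracleAttack | PaperGraphs/check_calibration.py | filter_hitsrange
-- ===== SOURCE A (Python) =====
-- def filter_hitsrange(hits, hit_times, range_times):
--     for i in range(len(hits)):
--         if hit_times[i]>=range_times[0]:
--             break
--     else:
--         filtered_hits = []
--         filtered_hit_times =[]
--         return (filtered_hits, filtered_hit_times)
--     for j in range(len(hits))[::-1]:
--         if hit_times[j]<=range_times[1]:
--             break
--     else:
--         filtered_hits = []
--         filtered_hit_times =[]
--         return (filtered_hits, filtered_hit_times)
--
--     filtered_hits = hits[i:j+1]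
--     filtered_hit_times = hit_times[i:j+1]
--     return (filtered_hits, filtered_hit_times)
-- ===== SOURCE B (Python) =====
-- def filter_hitsrange(hits, hit_times, range_times):
--     n = len(hits)
--     if n == 0:
--         return ([], [])
--     lo, hi = range_times[0], range_times[1]
--     first = last = None
--     for k in range(n):
--         t = hit_times[k]
--         if first is None and t >= lo:
--             first = k
--         if t <= hi:
--             last = k
--     if first is None or last is None:
--         return ([], [])
--     return (hits[first:last+1], hit_times[first:last+1])
-- ===== Notes on version B (the rewrite author's own statement) =====
-- stated objective: simpler
-- what changed: Replaces A's two directional scans with break/else (a forward scan for the first in-range index and a backward scan for the last) by a single forward pass that tracks both boundary indices at once.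
-- outside the precondition, e.g. on filter_hitsrange([1], [0], [5]): A returns ([], []), B raises IndexError
import Mathlib
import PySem

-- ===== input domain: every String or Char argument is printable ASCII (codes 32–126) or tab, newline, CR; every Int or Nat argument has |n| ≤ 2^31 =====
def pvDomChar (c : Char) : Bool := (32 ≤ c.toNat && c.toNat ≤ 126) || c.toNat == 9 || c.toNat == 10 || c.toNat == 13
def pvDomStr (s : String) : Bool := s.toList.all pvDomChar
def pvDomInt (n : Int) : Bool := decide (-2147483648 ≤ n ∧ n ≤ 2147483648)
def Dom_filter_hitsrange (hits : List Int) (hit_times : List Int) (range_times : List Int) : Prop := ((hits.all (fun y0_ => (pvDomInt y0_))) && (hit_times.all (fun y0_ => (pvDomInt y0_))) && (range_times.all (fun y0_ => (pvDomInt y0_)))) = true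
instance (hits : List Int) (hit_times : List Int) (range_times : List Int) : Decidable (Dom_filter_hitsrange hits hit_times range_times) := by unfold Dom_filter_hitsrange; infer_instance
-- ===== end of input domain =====

-- B replaces A's two directional break/else scans by one forward pass tracking both
-- boundary indices (objective: simpler; same O(n) cost; return value only).

-- ===== PORT A =====
-- A's for-loop with break/else over a list of indices: returns the first index whose
-- hit time satisfies p, none = the loop's else branch.  hit_times[k] is ported with
-- pyGetD (index in range under Pre_filter_hitsrange; Python raises IndexError outside it).
def aScan (ht : List Int) (p : Int → Prop) [DecidablePred p] : List Nat → Option Nat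
  | [] => none
  | k :: ks => if p (PySem.List.pyGetD ht (k : Int) 0) then some k else aScan ht p ks

def filter_hitsrange (hits : List Int) (hit_times : List Int) (range_times : List Int) : List Int × List Int :=
  -- first loop: for i in range(len(hits)): if hit_times[i] >= range_times[0]: break / else return ([],[])
  match aScan hit_times (fun t => t ≥ PySem.List.pyGetD range_times 0 0) (List.range hits.length) with
  | none => ([], [])
  | some i =>
    -- second loop: for j in range(len(hits))[::-1]: if hit_times[j] <= range_times[1]: break / else return ([],[])
    match aScan hit_times (fun t => t ≤ PySem.List.pyGetD range_times 1 0) (List.range hits.length).reverse with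
    | none => ([], [])
    | some j =>
      (PySem.List.slice hits (some (i : Int)) (some ((j : Int) + 1)),
       PySem.List.slice hit_times (some (i : Int)) (some ((j : Int) + 1)))

-- ===== PORT B =====
-- one step of B's single forward pass: state = (first in-range index so far, last so far)
def bStep (ht : List Int) (lo hi : Int) (s : Option Nat × Option Nat) (k : Nat) : Option Nat × Option Nat :=
  let t := PySem.List.pyGetD ht (k : Int) 0
  ((match s.1 with
    | none => if t ≥ lo then some k else none
    | some i => some i),
   if t ≤ hi then some k else s.2)

def filter_hitsrange_alt (hits : List Int) (hit_times : List Int) (range_times : List Int) : List Int × List Int :=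
  let n := hits.length
  if n = 0 then ([], [])
  else
    let lo := PySem.List.pyGetD range_times 0 0
    let hi := PySem.List.pyGetD range_times 1 0
    match (List.range n).foldl (bStep hit_times lo hi) (none, none) with
    | (some i, some j) =>
      (PySem.List.slice hits (some (i : Int)) (some ((j : Int) + 1)),
       PySem.List.slice hit_times (some (i : Int)) (some ((j : Int) + 1)))
    | _ => ([], [])

-- ===== PRECONDITION & SPEC =====
-- Pre_ excludes the inputs where Python A raises IndexError (hit_times shorter than hits,
-- or range_times shorter than 2 with a hit time reaching the bounds), and with them the
-- accidental corner where A with nonempty hits and range_times of length < 2 still returns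
-- ([], []) only because no hit time reaches range_times[0] (B reads range_times[1] up front
-- and raises there).
def Pre_filter_hitsrange (hits : List Int) (hit_times : List Int) (range_times : List Int) : Prop :=
  hits = [] ∨ (hits.length ≤ hit_times.length ∧ 2 ≤ range_times.length)
instance (hits : List Int) (hit_times : List Int) (range_times : List Int) : Decidable (Pre_filter_hitsrange hits hit_times range_times) := by unfold Pre_filter_hitsrange; infer_instance
def pvWitness_filter_hitsrange : List Int × List Int × List Int := ([1, 2], [3, 4], [0, 10])

def Spec_filter_hitsrange (hits : List Int) (hit_times : List Int) (range_times : List Int) (out : List Int × List Int) : Prop := out = filter_hitsrange_alt hits hit_times range_times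
instance (hits : List Int) (hit_times : List Int) (range_times : List Int) (out : List Int × List Int) : Decidable (Spec_filter_hitsrange hits hit_times range_times out) := by unfold Spec_filter_hitsrange; infer_instance

-- ===== CLAIM (what is proved, stated in full; the proofs are below) =====
def Claim_equal_filter_hitsrange : Prop := ∀ (hits : List Int) (hit_times : List Int) (range_times : List Int), Dom_filter_hitsrange hits hit_times range_times → Pre_filter_hitsrange hits hit_times range_times → Spec_filter_hitsrange hits hit_times range_times (filter_hitsrange hits hit_times range_times)

-- ===== LEMMAS AND PROOFS =====

-- first-of-two-options (Python's "first match wins")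
def ofirst : Option Nat → Option Nat → Option Nat
  | some x, _ => some x
  | none, a => a

theorem ofirst_none_right (a : Option Nat) : ofirst a none = a := by
  cases a <;> rfl

theorem ofirst_assoc (a b c : Option Nat) : ofirst (ofirst a b) c = ofirst a (ofirst b c) := by
  cases a <;> rfl

theorem aScan_append (ht : List Int) (p : Int → Prop) [DecidablePred p] (xs ys : List Nat) :
    aScan ht p (xs ++ ys) = ofirst (aScan ht p xs) (aScan ht p ys) := by
  induction xs with
  | nil => rfl
  | cons k ks ih =>
    simp only [List.cons_append, aScan]
    split <;> simp [ofirst, ih]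

-- the first component of B's fold is A's forward scan
theorem fstFold_eq (ht : List Int) (lo : Int) (ks : List Nat) (acc : Option Nat) :
    ks.foldl (fun (a : Option Nat) (k : Nat) => match a with
      | none => if PySem.List.pyGetD ht (k : Int) 0 ≥ lo then some k else none
      | some i => some i) acc
    = ofirst acc (aScan ht (fun t => t ≥ lo) ks) := by
  induction ks generalizing acc with
  | nil => cases acc <;> rfl
  | cons k ks ih =>
    cases acc with
    | some i => simp only [List.foldl_cons, ih]; rfl
    | none =>
      simp only [List.foldl_cons, aScan]
      by_cases h : PySem.List.pyGetD ht (k : Int) 0 ≥ lo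
      · rw [if_pos h, ih, if_pos h]; rfl
      · rw [if_neg h, ih, if_neg h]

-- the second component of B's fold is A's backward scan (first match of the reversed list)
theorem sndFold_eq (ht : List Int) (hi : Int) (ks : List Nat) (acc : Option Nat) :
    ks.foldl (fun (a : Option Nat) (k : Nat) => if PySem.List.pyGetD ht (k : Int) 0 ≤ hi then some k else a) acc
    = ofirst (aScan ht (fun t => t ≤ hi) ks.reverse) acc := by
  induction ks generalizing acc with
  | nil => rfl
  | cons k ks ih =>
    rw [List.foldl_cons, ih, List.reverse_cons, aScan_append, ofirst_assoc]
    congr 1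
    simp only [aScan]
    by_cases h : PySem.List.pyGetD ht (k : Int) 0 ≤ hi
    · rw [if_pos h, if_pos h]; rfl
    · rw [if_neg h, if_neg h]; rfl

-- B's pair fold decomposes into the two independent component folds
theorem pairFold_eq (ht : List Int) (lo hi : Int) (ks : List Nat) (s : Option Nat × Option Nat) :
    ks.foldl (bStep ht lo hi) s
    = (ks.foldl (fun (a : Option Nat) (k : Nat) => match a with
        | none => if PySem.List.pyGetD ht (k : Int) 0 ≥ lo then some k else none
        | some i => some i) s.1,
       ks.foldl (fun (a : Option Nat) (k : Nat) => if PySem.List.pyGetD ht (k : Int) 0 ≤ hi then some k else a) s.2) := by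
  induction ks generalizing s with
  | nil => rfl
  | cons k ks ih =>
    rw [List.foldl_cons, List.foldl_cons, List.foldl_cons, ih]
    obtain ⟨a, b⟩ := s
    cases a <;> rfl

-- ===== VERDICT (by name: the statement is the Claim_ definition above) =====
theorem filter_hitsrange_spec : Claim_equal_filter_hitsrange := by
  intro hits hit_times range_times _ _
  simp only [Spec_filter_hitsrange, filter_hitsrange, filter_hitsrange_alt]
  by_cases hn : hits.length = 0
  · simp [hn, aScan]
  · rw [if_neg hn, pairFold_eq, fstFold_eq, sndFold_eq, ofirst_none_right]
    cases h1 : aScan hit_times (fun t => t ≥ PySem.List.pyGetD range_times 0 0) (List.range hits.length) with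
    | none => simp [ofirst]
    | some i =>
      cases h2 : aScan hit_times (fun t => t ≤ PySem.List.pyGetD range_times 1 0) (List.range hits.length).reverse with
      | none => simp [ofirst]
      | some j => simp [ofirst]
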